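-- pv_equiv track=rewrite | github.com/dylan-eck/bsu-reu-blockchain | scripts/functions.py | get_partitions
-- ===== SOURCE A (Python) =====
-- def get_codewords(n, k):
--     codewords = []
--     codeword = [1 for _ in range(0, n)]
--     while True:
--         codewords.append(codeword.copy())
--         startIndex = n - 1
--         while startIndex >= 0:
--             if not codeword[0 : startIndex]:
--                 return codewords
--             else:
--                 maxValue = max(codeword[0 : startIndex])
--                 codewordAtStartIndex = codeword[startIndex]
--                 if maxValue > k or codewordAtStartIndex > maxValue or codewordAtStartIndex >= k:
--                     codeword[startIndex] = 1
--                     startIndex -= 1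
--                 else:
--                     codeword[startIndex] += 1
--                     break
--
-- def get_partitions(list,max_size):
--     n = len(list)
--     codewords = get_codewords(n,max_size)
--
--     partitions = []
--     for codeword in codewords:
--         partition = []
--         num_subsets = max(codeword)
--         for i in range(num_subsets):
--             partition.append([])
--
--         for i in range(len(codeword)):
--             element = list[i]
--             subset = codeword[i]
--             partition[subset-1].append(element)
--
--         partitions.append(partition)
--     return partitions
-- ===== SOURCE B (Python) =====
-- def get_partitions(list, max_size):
--     n = len(list)
--     kk = max_size if max_size > 1 else 1
--     result = []
--     blocks = []
--     def gen(i):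
--         if i == n:
--             result.append([blk.copy() for blk in blocks])
--             return
--         x = list[i]
--         for j in range(len(blocks)):
--             blocks[j].append(x)
--             gen(i + 1)
--             blocks[j].pop()
--         if len(blocks) < kk:
--             blocks.append([x])
--             gen(i + 1)
--             blocks.pop()
--     gen(0)
--     return result
-- ===== Notes on version B (the rewrite author's own statement) =====
-- stated objective: alternative
-- what changed: A enumerates restricted-growth codewords with an odometer loop that rescans list slices for their max at every step and then builds each partition from its codeword in a second pass; B drops codewords entirely and does a DFS over the partitions themselves, extending each existing block (or opening a new one while fewer than max_size blocks exist) in place.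
-- outside the precondition, e.g. on get_partitions([], 3): A does not finish within the time limit, B returns [[]]
import Mathlib
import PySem

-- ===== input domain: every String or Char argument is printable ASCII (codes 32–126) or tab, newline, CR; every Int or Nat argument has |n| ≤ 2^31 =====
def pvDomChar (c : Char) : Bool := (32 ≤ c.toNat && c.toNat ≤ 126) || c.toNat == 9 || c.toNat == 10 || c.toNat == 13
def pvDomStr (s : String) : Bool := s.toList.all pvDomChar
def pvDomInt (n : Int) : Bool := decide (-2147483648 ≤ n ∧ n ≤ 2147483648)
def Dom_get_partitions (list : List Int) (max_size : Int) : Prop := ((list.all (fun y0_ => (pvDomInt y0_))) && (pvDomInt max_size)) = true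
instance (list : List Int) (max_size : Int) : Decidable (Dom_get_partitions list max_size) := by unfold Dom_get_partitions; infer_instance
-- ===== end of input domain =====

-- B replaces A's codeword odometer (regenerate-and-rescan of restricted-growth strings with
-- slice-max recomputation, then a separate partition-build pass) by a direct DFS over the blocks
-- themselves, extending each block in place; return values agree on every non-empty list.

-- ===== PORT A =====

-- inner 'while startIndex >= 0' loop of get_codewords; none = the 'return codewords' exit
def pvInnerA (k : Int) (cw : List Int) (s : Int) : Option (List Int) :=
  if h0 : 0 ≤ s then
    let pre := PySem.List.slice cw (some 0) (some s)
    if hpre : pre = [] then none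
    else
      let maxValue := (PySem.List.max? pre (fun v => v)).getD 0
      let c := PySem.List.pyGetD cw s 0
      if maxValue > k ∨ c > maxValue ∨ c ≥ k then
        pvInnerA k (PySem.List.pySetD cw s 1) (s - 1)
      else some (PySem.List.pySetD cw s (c + 1))
  else some cw   -- inner loop falls through (only when n = 0); outer loop continues unchanged
termination_by s.toNat
decreasing_by
  have hs : 0 < s := by
    rcases lt_or_eq_of_le h0 with h | h
    · exact h
    · exfalso; apply hpre
      show PySem.List.slice cw (some 0) (some s) = []
      rw [← h]; simp [PySem.List.slice]
  omega

-- outer 'while True' loop, with fuel (the loop terminates; fuel chosen ≥ the iteration count)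
def pvOuterA (k n : Int) : Nat → List Int → List (List Int)
  | 0, _ => []
  | fuel + 1, codeword =>
    codeword :: (match pvInnerA k codeword (n - 1) with
      | none => []
      | some cw' => pvOuterA k n fuel cw')

def pvGetCodewords (n k : Int) : List (List Int) :=
  -- fuel ((max k 1).toNat + 1) ^ n.toNat + 1 bounds the number of outer iterations:
  -- each iteration appends a distinct length-n codeword with entries in [1, max k 1]
  pvOuterA k n (((max k 1).toNat + 1) ^ n.toNat + 1) (List.replicate n.toNat 1)

def pvPartA (list : List Int) (codeword : List Int) : List (List Int) :=
  let num_subsets := (PySem.List.max? codeword (fun v => v)).getD 0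
  -- 'for i in range(num_subsets): partition.append([])'
  let part0 := (List.range num_subsets.toNat).foldl (fun p _ => p ++ [([] : List Int)]) []
  (PySem.List.pyRange 0 (codeword.length : Int) 1).foldl
    (fun partition i =>
      let element := PySem.List.pyGetD list i 0
      let subset := PySem.List.pyGetD codeword i 0
      PySem.List.pySetD partition (subset - 1)
        (PySem.List.pyGetD partition (subset - 1) [] ++ [element]))
    part0

def get_partitions (list : List Int) (max_size : Int) : List (List (List Int)) :=
  let codewords := pvGetCodewords (list.length : Int) max_size
  codewords.foldl (fun partitions codeword => partitions ++ [pvPartA list codeword]) []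

-- ===== PORT B =====

-- gen(i): DFS over the remaining elements, blocks maintained in place
def pvGenAlt (kk : Int) : List Int → List (List Int) → List (List (List Int))
  | [], blocks => [blocks]
  | x :: rest, blocks =>
      ((PySem.List.pyRange 0 (blocks.length : Int) 1).map
        (fun j => pvGenAlt kk rest
          (PySem.List.pySetD blocks j (PySem.List.pyGetD blocks j [] ++ [x])))).flatten
      ++ (if (blocks.length : Int) < kk then pvGenAlt kk rest (blocks ++ [[x]]) else [])

def get_partitions_alt (list : List Int) (max_size : Int) : List (List (List Int)) :=
  let kk := if max_size > 1 then max_size else 1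
  pvGenAlt kk list []

-- ===== PRECONDITION & SPEC =====
-- Pre_ excludes only the empty list, on which A's codeword loop never returns (it hangs forever).
def Pre_get_partitions (list : List Int) (max_size : Int) : Prop := list ≠ []
instance (list : List Int) (max_size : Int) : Decidable (Pre_get_partitions list max_size) := by
  unfold Pre_get_partitions; infer_instance

def pvWitness_get_partitions : List Int × Int := ([3, 1, 2], 2)

def Spec_get_partitions (list : List Int) (max_size : Int) (out : List (List (List Int))) : Prop := out = get_partitions_alt list max_size
instance (list : List Int) (max_size : Int) (out : List (List (List Int))) : Decidable (Spec_get_partitions list max_size out) := by unfold Spec_get_partitions; infer_instance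

-- ===== CLAIM (what is proved, stated in full; the proofs are below) =====
def Claim_equal_get_partitions : Prop := ∀ (list : List Int) (max_size : Int), Dom_get_partitions list max_size → Pre_get_partitions list max_size → Spec_get_partitions list max_size (get_partitions list max_size)

-- ===== LEMMAS AND PROOFS =====

-- ---- ghost objects ----

-- the 'kk' of Source B
def pvKK (k : Int) : Int := if k > 1 then k else 1

-- all codeword suffixes of length n under prefix running maximum m, in enumeration order
def pvGen (kk : Int) : Nat → Int → List (List Int)
  | 0, _ => [[]]
  | n + 1, m =>
      (PySem.List.pyRange 1 (min (m + 1) kk + 1) 1).flatMap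
        (fun v => (pvGen kk n (max m v)).map (v :: ·))

-- functional successor of a codeword suffix under prefix running maximum m
def pvSucc (k : Int) (m : Int) : List Int → Option (List Int)
  | [] => none
  | c :: t =>
    match pvSucc k (max m c) t with
    | some t' => some (c :: t')
    | none =>
        if m > k ∨ c > m ∨ c ≥ k then none
        else some ((c + 1) :: List.replicate t.length 1)

-- validity of a codeword suffix under prefix running maximum m
def pvValid (m : Int) : List Int → Prop
  | [] => True
  | c :: t => 1 ≤ c ∧ c ≤ m + 1 ∧ pvValid (max m c) t

-- one step of B's partition building, on a pair (element, codeword value)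
def pvStep (P : List (List Int)) (p : Int × Int) : List (List Int) :=
  if (P.length : Int) < p.2 then P ++ [[p.1]]
  else PySem.List.pySetD P (p.2 - 1) (PySem.List.pyGetD P (p.2 - 1) [] ++ [p.1])

-- A's partition-filling step (the target slot always exists)
def pvStepA (P : List (List Int)) (p : Int × Int) : List (List Int) :=
  PySem.List.pySetD P (p.2 - 1) (PySem.List.pyGetD P (p.2 - 1) [] ++ [p.1])

-- max of a nonempty python list
def pvMaxOf (p : List Int) : Int := (PySem.List.max? p (fun v => v)).getD 0

-- ---- small facts ----

lemma pvKK_ge_one (k : Int) : 1 ≤ pvKK k := by unfold pvKK; split <;> omega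

lemma pvKK_eq_max (k : Int) : pvKK k = max k 1 := by unfold pvKK; split <;> omega

lemma pvMaxOf_cons (c : Int) (t : List Int) : pvMaxOf (c :: t) = t.foldl max c := by
  simp [pvMaxOf, PySem.List.max?_id_cons]

lemma pvMaxOf_append (p t : List Int) (hp : p ≠ []) :
    pvMaxOf (p ++ t) = t.foldl max (pvMaxOf p) := by
  obtain ⟨c, p', rfl⟩ := List.exists_cons_of_ne_nil hp
  rw [List.cons_append, pvMaxOf_cons, pvMaxOf_cons, List.foldl_append]

lemma pvGen_length_mem (kk : Int) : ∀ (n : Nat) (m : Int) (cw : List Int),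
    cw ∈ pvGen kk n m → cw.length = n := by
  intro n
  induction n with
  | zero => intro m cw h; simp [pvGen] at h; simp [h]
  | succ n ih =>
    intro m cw h
    simp only [pvGen, List.mem_flatMap, List.mem_map] at h
    obtain ⟨v, _, t, ht, rfl⟩ := h
    simp [ih _ _ ht]

lemma pvGen_valid (kk : Int) : ∀ (n : Nat) (m : Int) (cw : List Int),
    cw ∈ pvGen kk n m → pvValid m cw := by
  intro n
  induction n with
  | zero => intro m cw h; simp [pvGen] at h; simp [h, pvValid]
  | succ n ih =>
    intro m cw h
    simp only [pvGen, List.mem_flatMap, List.mem_map] at h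
    obtain ⟨v, hv, t, ht, rfl⟩ := h
    rw [PySem.List.mem_pyRange_one] at hv
    exact ⟨by omega, by omega, ih _ _ ht⟩

lemma pvGen_head (kk : Int) (hk : 1 ≤ kk) : ∀ (n : Nat) (m : Int), 0 ≤ m →
    (pvGen kk n m).head? = some (List.replicate n 1) := by
  intro n
  induction n with
  | zero => intro m _; simp [pvGen]
  | succ n ih =>
    intro m hm
    have hmin : (1 : Int) < min (m + 1) kk + 1 := by omega
    rw [pvGen, PySem.List.pyRange_one_cons hmin, List.flatMap_cons, List.head?_append]
    have h1 : (pvGen kk n (max m 1)).head? = some (List.replicate n 1) := ih _ (by omega)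
    rcases hg : pvGen kk n (max m 1) with _ | ⟨a, l⟩
    · rw [hg] at h1; simp at h1
    · rw [hg] at h1; simp at h1
      simp [h1, List.replicate_succ]

lemma pvGen_card (kk : Int) (hk : 1 ≤ kk) : ∀ (n : Nat) (m : Int), 0 ≤ m →
    (pvGen kk n m).length ≤ (kk.toNat + 1) ^ n := by
  intro n
  induction n with
  | zero => intro m _; simp [pvGen]
  | succ n ih =>
    intro m hm
    rw [pvGen]
    calc ((PySem.List.pyRange 1 (min (m + 1) kk + 1) 1).flatMap
            (fun v => (pvGen kk n (max m v)).map (v :: ·))).length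
        = ((PySem.List.pyRange 1 (min (m + 1) kk + 1) 1).map
            (fun v => ((pvGen kk n (max m v)).map (v :: ·)).length)).sum := by
          rw [List.length_flatMap]
      _ ≤ ((PySem.List.pyRange 1 (min (m + 1) kk + 1) 1).map
            (fun _ => (kk.toNat + 1) ^ n)).sum := by
          apply List.sum_le_sum
          intro v hv
          simp only [List.length_map]
          exact ih _ (by rw [PySem.List.mem_pyRange_one] at hv; omega)
      _ = (PySem.List.pyRange 1 (min (m + 1) kk + 1) 1).length * (kk.toNat + 1) ^ n := by
          rw [List.map_const', List.sum_replicate, smul_eq_mul]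
      _ ≤ (kk.toNat + 1) * (kk.toNat + 1) ^ n := by
          apply Nat.mul_le_mul_right
          rw [PySem.List.length_pyRange_one]
          omega
      _ = (kk.toNat + 1) ^ (n + 1) := by ring

-- ---- B side: pvGenAlt produces the partitions of the ghost codewords ----

lemma pvRange_cast (M : Nat) :
    PySem.List.pyRange 0 (M : Int) 1 = (List.range M).map (fun j : Nat => (j : Int)) := by
  rw [PySem.List.pyRange_one]
  have h : ((M : Int) - 0).toNat = M := by omega
  rw [h]
  apply List.map_congr_left
  intro j _
  omega

lemma pvRange_one_cast (M : Nat) :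
    PySem.List.pyRange 1 ((M : Int) + 1) 1 = (List.range M).map (fun j : Nat => ((j : Int) + 1)) := by
  rw [PySem.List.pyRange_one]
  have h : ((M : Int) + 1 - 1).toNat = M := by omega
  rw [h]
  apply List.map_congr_left
  intro j _
  omega

lemma pvStep_existing (P : List (List Int)) (x : Int) (j : Nat) (hj : j < P.length) :
    pvStep P (x, (j : Int) + 1) = P.set j (P.getD j [] ++ [x]) := by
  simp only [pvStep]
  rw [if_neg (by omega)]
  have h1 : ((j : Int) + 1 - 1) = ((j : Nat) : Int) := by omega
  rw [h1, PySem.List.pySetD_natCast, PySem.List.pyGetD_natCast]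

lemma pvStep_new (P : List (List Int)) (x : Int) :
    pvStep P (x, (P.length : Int) + 1) = P ++ [[x]] := by
  simp only [pvStep]
  rw [if_pos (by omega)]

lemma pvGenAlt_eq (kk : Int) :
    ∀ (rest : List Int) (P : List (List Int)), (P.length : Int) ≤ kk →
    pvGenAlt kk rest P =
      (pvGen kk rest.length (P.length : Int)).map (fun suf => (rest.zip suf).foldl pvStep P) := by
  intro rest
  induction rest with
  | nil => intro P hP; simp [pvGenAlt, pvGen]
  | cons x rest ih =>
    intro P hP
    have hL : pvGenAlt kk (x :: rest) P =
        ((List.range P.length).flatMap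
          (fun j => pvGenAlt kk rest (P.set j (P.getD j [] ++ [x]))))
        ++ (if (P.length : Int) < kk then pvGenAlt kk rest (P ++ [[x]]) else []) := by
      rw [pvGenAlt, pvRange_cast, ← List.flatMap_def, List.flatMap_map]
      simp only [PySem.List.pySetD_natCast, PySem.List.pyGetD_natCast]
    have hblock : ∀ j : Nat, j < P.length →
        pvGenAlt kk rest (P.set j (P.getD j [] ++ [x]))
          = (pvGen kk rest.length (max (P.length : Int) ((j : Int) + 1))).map
              (fun suf => ((x :: rest).zip (((j : Int) + 1) :: suf)).foldl pvStep P) := by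
      intro j hj
      have hmax : max (P.length : Int) ((j : Int) + 1) = (P.length : Int) := by omega
      have hlen : ((P.set j (P.getD j [] ++ [x])).length : Int) = (P.length : Int) := by simp
      rw [hmax, ih _ (by rw [hlen]; exact hP), hlen]
      apply List.map_congr_left
      intro suf _
      rw [List.zip_cons_cons, List.foldl_cons, pvStep_existing P x j hj]
    rw [hL]
    by_cases hmk : (P.length : Int) < kk
    · -- a new block may be opened
      have hmin : min ((P.length : Int) + 1) kk + 1 = ((P.length : Int) + 1) + 1 := by omega
      rw [if_pos hmk]
      have hR : pvGen kk (x :: rest).length (P.length : Int) =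
          ((List.range P.length).flatMap
            (fun j : Nat => (pvGen kk rest.length (max (P.length : Int) ((j : Int) + 1))).map
              ((((j : Int) + 1)) :: ·)))
          ++ (pvGen kk rest.length (max (P.length : Int) ((P.length : Int) + 1))).map
              (((P.length : Int) + 1) :: ·) := by
        rw [List.length_cons, pvGen, hmin,
          PySem.List.pyRange_one_succ_right (by omega : (1 : Int) ≤ (P.length : Int) + 1),
          List.flatMap_append, pvRange_one_cast, List.flatMap_map,
          List.flatMap_cons, List.flatMap_nil, List.append_nil]
      rw [hR, List.map_append, List.map_flatMap]
      congr 1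
      · apply List.flatMap_congr
        intro j hj
        rw [List.map_map, hblock j (List.mem_range.mp hj)]
        rfl
      · have hmax : max (P.length : Int) ((P.length : Int) + 1) = (P.length : Int) + 1 := by omega
        have hlen : (((P ++ [[x]]).length : Nat) : Int) = (P.length : Int) + 1 := by simp
        rw [hmax, ih (P ++ [[x]]) (by rw [hlen]; omega), hlen, List.map_map]
        apply List.map_congr_left
        intro suf _
        rw [Function.comp_apply, List.zip_cons_cons, List.foldl_cons, pvStep_new]
    · -- blocks are saturated: no new block
      have hmin : min ((P.length : Int) + 1) kk + 1 = (P.length : Int) + 1 := by omega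
      rw [if_neg hmk, List.append_nil]
      have hR : pvGen kk (x :: rest).length (P.length : Int) =
          (List.range P.length).flatMap
            (fun j : Nat => (pvGen kk rest.length (max (P.length : Int) ((j : Int) + 1))).map
              ((((j : Int) + 1)) :: ·)) := by
        rw [List.length_cons, pvGen, hmin, pvRange_one_cast, List.flatMap_map]
      rw [hR, List.map_flatMap]
      apply List.flatMap_congr
      intro j hj
      rw [List.map_map, hblock j (List.mem_range.mp hj)]
      rfl

-- ---- A side: the inner scan computes the functional successor ----

lemma pvInnerA_unfold (k : Int) (cw : List Int) (s : Int) (hs : 0 ≤ s)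
    (hpre : PySem.List.slice cw (some 0) (some s) ≠ []) :
    pvInnerA k cw s =
      (if ((PySem.List.max? (PySem.List.slice cw (some 0) (some s)) (fun v => v)).getD 0) > k ∨
          (PySem.List.pyGetD cw s 0) > ((PySem.List.max? (PySem.List.slice cw (some 0) (some s)) (fun v => v)).getD 0) ∨
          (PySem.List.pyGetD cw s 0) ≥ k then
        pvInnerA k (PySem.List.pySetD cw s 1) (s - 1)
      else some (PySem.List.pySetD cw s ((PySem.List.pyGetD cw s 0) + 1))) := by
  rw [pvInnerA, dif_pos hs]
  exact dif_neg hpre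

lemma pvInnerA_stop (k : Int) (cw : List Int) (s : Int) (hs : 0 ≤ s)
    (h : PySem.List.slice cw (some 0) (some s) = []) :
    pvInnerA k cw s = none := by
  rw [pvInnerA, dif_pos hs]
  exact dif_pos h

lemma pvSucc_snoc (k : Int) : ∀ (t : List Int) (m c : Int),
    pvSucc k m (t ++ [c]) =
      if t.foldl max m > k ∨ c > t.foldl max m ∨ c ≥ k then (pvSucc k m t).map (· ++ [1])
      else some (t ++ [c + 1]) := by
  intro t
  induction t with
  | nil =>
    intro m c
    show pvSucc k m [c] = _
    rw [pvSucc]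
    simp only [pvSucc, List.foldl_nil, List.length_nil, List.replicate_zero, List.nil_append,
      Option.map_none]
  | cons a t ih =>
    intro m c
    show pvSucc k m (a :: (t ++ [c])) = _
    rw [pvSucc, ih (max m a) c]
    simp only [List.foldl_cons]
    by_cases h : t.foldl max (max m a) > k ∨ c > t.foldl max (max m a) ∨ c ≥ k
    · rw [if_pos h, if_pos h]
      rcases hs : pvSucc k (max m a) t with _ | t'
      · simp only [Option.map_none]
        rw [pvSucc, hs]
        by_cases h2 : m > k ∨ a > m ∨ a ≥ k
        · rw [if_pos h2, if_pos h2]; rfl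
        · rw [if_neg h2, if_neg h2]
          simp [List.replicate_succ', List.length_append]
      · simp only [Option.map_some]
        rw [pvSucc, hs]
        rfl
  
    · rw [if_neg h, if_neg h]
      rfl

lemma pvSliceAt (a b : List Int) :
    PySem.List.slice (a ++ b) (some 0) (some (a.length : Int)) = a := by
  rw [PySem.List.slice_zero_start, PySem.List.slice_to _ (by omega : (0:Int) ≤ (a.length : Int))]
  simp

lemma pvGetAt (a : List Int) (c : Int) (d : List Int) :
    PySem.List.pyGetD (a ++ c :: d) (a.length : Int) 0 = c := by
  rw [PySem.List.pyGetD_natCast, List.getD_append_right _ _ _ _ (le_refl _)]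
  simp

lemma pvSetAt (a : List Int) (c : Int) (d : List Int) (v : Int) :
    PySem.List.pySetD (a ++ c :: d) (a.length : Int) v = a ++ v :: d := by
  rw [PySem.List.pySetD_natCast, List.set_append, if_neg (by omega)]
  simp

lemma pvScan (k : Int) : ∀ (t p : List Int) (r : Nat), p ≠ [] →
    pvInnerA k (p ++ t ++ List.replicate r 1) ((p.length : Int) + (t.length : Int) - 1) =
      (match pvSucc k (pvMaxOf p) t with
      | some t' => some (p ++ t' ++ List.replicate r 1)
      | none => pvInnerA k (p ++ List.replicate (t.length + r) 1) ((p.length : Int) - 1)) := by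
  intro t
  induction t using List.reverseRecOn with
  | nil =>
    intro p r hp
    show pvInnerA k (p ++ [] ++ List.replicate r 1) _ = _
    rw [pvSucc]
    simp
  | append_singleton t₀ c ih =>
    intro p r hp
    have hlen : ((t₀ ++ [c]).length : Int) = (t₀.length : Int) + 1 := by simp
    have hs : (p.length : Int) + ((t₀ ++ [c]).length : Int) - 1 = (((p ++ t₀).length : Nat) : Int) := by
      simp; omega
    have hcw : p ++ (t₀ ++ [c]) ++ List.replicate r 1 = (p ++ t₀) ++ (c :: List.replicate r 1) := by
      simp
    rw [hcw, hs]
    have hpre : PySem.List.slice ((p ++ t₀) ++ (c :: List.replicate r 1)) (some 0)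
        (some (((p ++ t₀).length : Nat) : Int)) = p ++ t₀ := pvSliceAt _ _
    rw [pvInnerA_unfold k _ _ (by omega) (by rw [hpre]; simp [hp]), hpre]
    rw [pvGetAt (p ++ t₀) c (List.replicate r 1)]
    have hmax : (PySem.List.max? (p ++ t₀) (fun v => v)).getD 0 = t₀.foldl max (pvMaxOf p) := by
      rw [← pvMaxOf_append _ _ hp]; rfl
    rw [hmax, pvSucc_snoc]
    by_cases hcond : t₀.foldl max (pvMaxOf p) > k ∨ c > t₀.foldl max (pvMaxOf p) ∨ c ≥ k
    · rw [if_pos hcond, if_pos hcond]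
      rw [pvSetAt (p ++ t₀) c (List.replicate r 1) 1]
      have h1 : (p ++ t₀) ++ (1 :: List.replicate r 1) = p ++ t₀ ++ List.replicate (r + 1) 1 := by
        simp [List.replicate_succ]
      have h2 : (((p ++ t₀).length : Nat) : Int) - 1 = (p.length : Int) + (t₀.length : Int) - 1 := by
        simp
      rw [h1, h2, ih p (r + 1) hp]
      rcases hs2 : pvSucc k (pvMaxOf p) t₀ with _ | t' <;>
        simp only [Option.map_none, Option.map_some]
      · have h3 : t₀.length + (r + 1) = (t₀ ++ [c]).length + r := by simp; omega
        rw [h3]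
      · have h4 : p ++ t' ++ List.replicate (r + 1) 1 = p ++ (t' ++ [1]) ++ List.replicate r 1 := by
          simp [List.replicate_succ]
        rw [h4]
    · rw [if_neg hcond, if_neg hcond]
      rw [pvSetAt (p ++ t₀) c (List.replicate r 1) (c + 1)]
      show some _ = some _
      congr 1
      simp

lemma pvInner_top (k : Int) (c0 : Int) (t : List Int) :
    pvInnerA k (c0 :: t) (((c0 :: t).length : Int) - 1) = (pvSucc k c0 t).map (c0 :: ·) := by
  have h0 : ((c0 :: t).length : Int) - 1 = (([c0].length : Int)) + (t.length : Int) - 1 := by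
    simp
  have h1 : c0 :: t = [c0] ++ t ++ List.replicate 0 1 := by simp
  rw [h0, h1, pvScan k t [c0] 0 (by simp)]
  have hm : pvMaxOf [c0] = c0 := by simp [pvMaxOf_cons]
  rw [hm]
  rcases hs : pvSucc k c0 t with _ | t'
  · simp only [Option.map_none]
    apply pvInnerA_stop
    · simp
    · simp [PySem.List.slice]
  · simp

-- ---- the chain of successors through pvGen ----

lemma pvReset_iff (k m v : Int) (hm1 : 1 ≤ m) (hmk : m ≤ pvKK k) (hv1 : 1 ≤ v)
    (hv : v ≤ min (m + 1) (pvKK k)) :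
    ((m > k ∨ v > m ∨ v ≥ k) ↔ v = min (m + 1) (pvKK k)) := by
  unfold pvKK at *
  by_cases hk : k > 1
  · rw [if_pos hk] at hmk hv ⊢; omega
  · rw [if_neg hk] at hmk hv ⊢; omega

lemma pvSucc_cons_some (k m v : Int) (a b : List Int)
    (h : pvSucc k (max m v) a = some b) : pvSucc k m (v :: a) = some (v :: b) := by
  rw [pvSucc, h]

lemma pvSucc_cons_none (k m v : Int) (a : List Int)
    (h : pvSucc k (max m v) a = none) :
    pvSucc k m (v :: a) =
      (if m > k ∨ v > m ∨ v ≥ k then none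
       else some ((v + 1) :: List.replicate a.length 1)) := by
  rw [pvSucc, h]

lemma pvBlocks_head (kk : Int) (hk : 1 ≤ kk) (n : Nat) (m : Int) (hm : 0 ≤ m)
    (w b : Int) (hw : w < b) :
    ((PySem.List.pyRange w b 1).flatMap
      (fun v => (pvGen kk n (max m v)).map (v :: ·))).head? =
      some (w :: List.replicate n 1) := by
  rw [PySem.List.pyRange_one_cons hw, List.flatMap_cons, List.head?_append, List.head?_map,
    pvGen_head kk hk n (max m w) (by omega)]
  rfl

lemma pvGen_chain (k : Int) : ∀ (n : Nat) (m : Int), 1 ≤ m → m ≤ pvKK k →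
    List.IsChain (fun a b => pvSucc k m a = some b) (pvGen (pvKK k) n m) ∧
    (∀ a, (pvGen (pvKK k) n m).getLast? = some a → pvSucc k m a = none) := by
  intro n
  induction n with
  | zero =>
    intro m _ _
    constructor
    · exact List.isChain_singleton _
    · intro a ha
      simp [pvGen] at ha
      subst ha
      rw [pvSucc]
  | succ n ih =>
    intro m hm1 hmk
    have hk1 : 1 ≤ pvKK k := pvKK_ge_one k
    have hblock_chain : ∀ v : Int, 1 ≤ v → v ≤ min (m + 1) (pvKK k) →
        List.IsChain (fun a b => pvSucc k m a = some b)
          ((pvGen (pvKK k) n (max m v)).map (v :: ·)) := by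
      intro v hv1 hv2
      rw [List.isChain_map]
      apply List.IsChain.imp ?_ (ih (max m v) (by omega) (by omega)).1
      intro a b h
      exact pvSucc_cons_some k m v a b h
    have aux : ∀ (d : Nat) (v₀ : Int), 1 ≤ v₀ → v₀ + d = min (m + 1) (pvKK k) →
        List.IsChain (fun a b => pvSucc k m a = some b)
          ((PySem.List.pyRange v₀ (min (m + 1) (pvKK k) + 1) 1).flatMap
            (fun v => (pvGen (pvKK k) n (max m v)).map (v :: ·))) ∧
        (∀ a, ((PySem.List.pyRange v₀ (min (m + 1) (pvKK k) + 1) 1).flatMap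
            (fun v => (pvGen (pvKK k) n (max m v)).map (v :: ·))).getLast? = some a →
          pvSucc k m a = none) := by
      intro d
      induction d with
      | zero =>
        intro v₀ hv1 hv2
        rw [PySem.List.pyRange_one_cons (by omega), PySem.List.pyRange_one_eq_nil (by omega),
          List.flatMap_cons, List.flatMap_nil, List.append_nil]
        refine ⟨hblock_chain v₀ hv1 (by omega), ?_⟩
        intro a ha
        rw [List.getLast?_map] at ha
        rcases hg : (pvGen (pvKK k) n (max m v₀)).getLast? with _ | a₀
        · rw [hg] at ha; simp at ha
        · rw [hg] at ha
          simp only [Option.map_some, Option.some_inj] at ha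
          have hstop := (ih (max m v₀) (by omega) (by omega)).2 a₀ hg
          rw [← ha, pvSucc_cons_none k m v₀ a₀ hstop,
            if_pos ((pvReset_iff k m v₀ hm1 hmk hv1 (by omega)).mpr (by omega))]
      | succ d ihd =>
        intro v₀ hv1 hv2
        have hv₀ : v₀ < min (m + 1) (pvKK k) := by omega
        obtain ⟨hchain', hlast'⟩ := ihd (v₀ + 1) (by omega) (by omega)
        rw [PySem.List.pyRange_one_cons (by omega : v₀ < min (m + 1) (pvKK k) + 1),
          List.flatMap_cons]
        have hhead' : ((PySem.List.pyRange (v₀ + 1) (min (m + 1) (pvKK k) + 1) 1).flatMap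
            (fun v => (pvGen (pvKK k) n (max m v)).map (v :: ·))).head? =
            some ((v₀ + 1) :: List.replicate n 1) :=
          pvBlocks_head (pvKK k) hk1 n m (by omega) (v₀ + 1) _ (by omega)
        refine ⟨List.IsChain.append (hblock_chain v₀ hv1 (by omega)) hchain' ?_, ?_⟩
        · intro x hx y hy
          rw [List.getLast?_map, Option.mem_def] at hx
          rcases hg : (pvGen (pvKK k) n (max m v₀)).getLast? with _ | a₀
          · rw [hg] at hx; simp at hx
          · rw [hg] at hx
            simp only [Option.map_some, Option.some_inj] at hx
            rw [hhead', Option.mem_def, Option.some_inj] at hy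
            have hstop := (ih (max m v₀) (by omega) (by omega)).2 a₀ hg
            have hlen : a₀.length = n :=
              pvGen_length_mem (pvKK k) n (max m v₀) a₀ (List.mem_of_getLast? hg)
            rw [← hx, ← hy, pvSucc_cons_none k m v₀ a₀ hstop,
              if_neg (fun hr => by
                have := (pvReset_iff k m v₀ hm1 hmk hv1 (by omega)).mp hr
                omega), hlen]
        · intro a ha
          have hne : ((PySem.List.pyRange (v₀ + 1) (min (m + 1) (pvKK k) + 1) 1).flatMap
              (fun v => (pvGen (pvKK k) n (max m v)).map (v :: ·))) ≠ [] := by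
            intro h; rw [h] at hhead'; simp at hhead'
          rw [List.getLast?_append] at ha
          apply hlast' a
          rcases hg : ((PySem.List.pyRange (v₀ + 1) (min (m + 1) (pvKK k) + 1) 1).flatMap
              (fun v => (pvGen (pvKK k) n (max m v)).map (v :: ·))).getLast? with _ | z
          · exact absurd (List.getLast?_eq_none_iff.mp hg) hne
          · rw [hg] at ha
            simp at ha
            simp [ha]
    rw [pvGen]
    exact aux (min (m + 1) (pvKK k) - 1).toNat 1 (by omega) (by omega)

-- ---- the outer loop enumerates the chain ----

lemma pvGen_zero (kk : Int) (hk : 1 ≤ kk) (n : Nat) :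
    pvGen kk (n + 1) 0 = (pvGen kk n 1).map (1 :: ·) := by
  rw [pvGen]
  have h1 : min ((0 : Int) + 1) kk = 1 := by omega
  rw [h1, PySem.List.pyRange_one_cons (by omega), PySem.List.pyRange_one_eq_nil (by omega),
    List.flatMap_cons, List.flatMap_nil, List.append_nil]
  norm_num

lemma pvOuter_run (k n : Int) : ∀ (L : List (List Int)) (fuel : Nat) (x : List Int),
    L.head? = some x →
    List.IsChain (fun a b => pvInnerA k a (n - 1) = some b) L →
    (∀ a, L.getLast? = some a → pvInnerA k a (n - 1) = none) →
    L.length ≤ fuel →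
    pvOuterA k n fuel x = L := by
  intro L
  induction L with
  | nil => intro fuel x h _ _ _; simp at h
  | cons y L' ihL =>
    intro fuel x hh hc hl hf
    have hxy : y = x := by simpa using hh
    subst hxy
    cases fuel with
    | zero => simp at hf
    | succ f =>
      rw [pvOuterA]
      cases L' with
      | nil =>
        rw [hl y (by simp)]
      | cons z L'' =>
        obtain ⟨hyz, hc'⟩ := List.isChain_cons_cons.mp hc
        rw [hyz]
        have hrec := ihL f z rfl hc'
          (fun a ha => hl a (by rw [List.getLast?_cons_cons]; exact ha))
          (by simp at hf ⊢; omega)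
        exact congrArg (y :: ·) hrec

lemma pvCodewords_eq (k : Int) (n' : Nat) :
    pvGetCodewords (((n' + 1 : Nat) : Nat) : Int) k = pvGen (pvKK k) (n' + 1) 0 := by
  have hk1 : 1 ≤ pvKK k := pvKK_ge_one k
  have htn : ((((n' + 1 : Nat) : Nat) : Int)).toNat = n' + 1 := by omega
  rw [pvGetCodewords, htn]
  have hlen : ∀ cw ∈ pvGen (pvKK k) (n' + 1) 0, cw.length = n' + 1 :=
    fun cw h => pvGen_length_mem (pvKK k) (n' + 1) 0 cw h
  have hchain0 := pvGen_chain k n' 1 le_rfl hk1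
  apply pvOuter_run
  · rw [pvGen_head (pvKK k) hk1 (n' + 1) 0 le_rfl]
  · rw [pvGen_zero (pvKK k) hk1 n', List.isChain_map]
    apply List.IsChain.imp_of_mem_imp ?_ hchain0.1
    intro a b ha _ hab
    have hlena : a.length = n' := pvGen_length_mem (pvKK k) n' 1 a ha
    have h1 : ((((n' + 1 : Nat) : Nat) : Int)) - 1 = (((1 :: a).length : Nat) : Int) - 1 := by
      simp [hlena]
    rw [h1, pvInner_top k 1 a]
    have : pvSucc k 1 a = some b := by
      have hm : max (1 : Int) 1 = 1 := by omega
      simpa [hm] using hab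
    rw [this]
    rfl
  · intro a ha
    rw [pvGen_zero (pvKK k) hk1 n', List.getLast?_map] at ha
    rcases hg : (pvGen (pvKK k) n' 1).getLast? with _ | a₀
    · rw [hg] at ha; simp at ha
    · rw [hg] at ha
      simp only [Option.map_some, Option.some_inj] at ha
      have hlena : a₀.length = n' := pvGen_length_mem (pvKK k) n' 1 a₀ (List.mem_of_getLast? hg)
      have h1 : ((((n' + 1 : Nat) : Nat) : Int)) - 1 = (((1 :: a₀).length : Nat) : Int) - 1 := by
        simp [hlena]
      rw [← ha, h1, pvInner_top k 1 a₀, hchain0.2 a₀ hg]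
      rfl
  · calc (pvGen (pvKK k) (n' + 1) 0).length
        ≤ ((pvKK k).toNat + 1) ^ (n' + 1) := pvGen_card (pvKK k) hk1 (n' + 1) 0 le_rfl
      _ ≤ ((max k 1).toNat + 1) ^ (((((n' + 1 : Nat) : Nat) : Int)).toNat) + 1 := by
          rw [← pvKK_eq_max, htn]; omega

-- ---- A's partition build equals B's incremental build on valid codewords ----

lemma pvInitRep : ∀ (l : List Nat) (acc : List (List Int)),
    l.foldl (fun p _ => p ++ [([] : List Int)]) acc = acc ++ List.replicate l.length [] := by
  intro l
  induction l with
  | nil => intro acc; simp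
  | cons a l ih =>
    intro acc
    rw [List.foldl_cons, ih (acc ++ [[]])]
    simp [List.replicate_succ]

lemma pvFold2N : ∀ (ys xs : List Int) (F : List (List Int) → Int → Int → List (List Int))
    (init : List (List Int)), xs.length = ys.length →
    (List.range ys.length).foldl (fun acc j => F acc (xs.getD j 0) (ys.getD j 0)) init
      = (xs.zip ys).foldl (fun acc p => F acc p.1 p.2) init := by
  intro ys
  induction ys with
  | nil => intro xs F init h; simp
  | cons y ys ih =>
    intro xs F init h
    rcases xs with _ | ⟨x, xs⟩
    · simp at h
    rw [List.length_cons, List.range_succ_eq_map, List.foldl_cons, List.foldl_map]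
    simp only [List.getD_cons_zero, List.getD_cons_succ]
    rw [ih xs F (F init x y) (by simpa using h)]
    simp

lemma pvFold2 (ys xs : List Int) (F : List (List Int) → Int → Int → List (List Int))
    (init : List (List Int)) (h : xs.length = ys.length) :
    (PySem.List.pyRange 0 (ys.length : Int) 1).foldl
      (fun acc i => F acc (PySem.List.pyGetD xs i 0) (PySem.List.pyGetD ys i 0)) init
      = (xs.zip ys).foldl (fun acc p => F acc p.1 p.2) init := by
  rw [pvRange_cast, List.foldl_map]
  simp only [PySem.List.pyGetD_natCast]
  exact pvFold2N ys xs F init h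

lemma pvGetPre (P Q : List (List Int)) (c : Int) (h1 : 1 ≤ c) (h2 : c ≤ (P.length : Int)) :
    PySem.List.pyGetD (P ++ Q) (c - 1) [] = PySem.List.pyGetD P (c - 1) [] := by
  rw [PySem.List.pyGetD_eq_getElem _ _ (by omega) (by simp; omega),
    PySem.List.pyGetD_eq_getElem _ _ (by omega) (by omega)]
  rw [List.getElem_append_left (by omega)]

lemma pvSetPre (P Q : List (List Int)) (c : Int) (v : List Int)
    (h1 : 1 ≤ c) (h2 : c ≤ (P.length : Int)) :
    PySem.List.pySetD (P ++ Q) (c - 1) v = PySem.List.pySetD P (c - 1) v ++ Q := by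
  rw [PySem.List.pySetD_of_nonneg _ _ (by omega), PySem.List.pySetD_of_nonneg _ _ (by omega)]
  rw [List.set_append, if_pos (by omega)]

lemma pvGrow : ∀ (zs : List (Int × Int)) (P : List (List Int)) (r : Nat),
    pvValid (P.length : Int) (zs.map Prod.snd) →
    ((P.length : Int) + (r : Int) = (zs.map Prod.snd).foldl max (P.length : Int)) →
    zs.foldl pvStepA (P ++ List.replicate r []) = zs.foldl pvStep P := by
  intro zs
  induction zs with
  | nil =>
    intro P r _ hmax
    simp only [List.map_nil, List.foldl_nil] at hmax ⊢
    have hr : r = 0 := by omega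
    simp [hr]
  | cons p zs ih =>
    obtain ⟨x, c⟩ := p
    intro P r hval hmax
    rw [List.map_cons] at hval hmax
    obtain ⟨hc1, hc2, hval'⟩ := hval
    rw [List.foldl_cons] at hmax
    dsimp only at hc1 hc2 hval' hmax
    rw [List.foldl_cons, List.foldl_cons]
    by_cases hcase : c ≤ (P.length : Int)
    · have hmaxeq : max (P.length : Int) c = (P.length : Int) := by omega
      have hstepA : pvStepA (P ++ List.replicate r []) (x, c)
          = pvStepA P (x, c) ++ List.replicate r [] := by
        simp only [pvStepA]
        rw [pvGetPre P _ c hc1 hcase, pvSetPre P _ c _ hc1 hcase]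
      have hstepB : pvStep P (x, c) = pvStepA P (x, c) := by
        simp only [pvStep, pvStepA]
        rw [if_neg (by omega)]
      have hlen : (pvStepA P (x, c)).length = P.length := by
        simp only [pvStepA]
        rw [PySem.List.pySetD_of_nonneg _ _ (by omega)]
        simp
      rw [hstepA, hstepB]
      apply ih
      · rw [hlen]
        rwa [hmaxeq] at hval'
      · rw [hlen]
        rwa [hmaxeq] at hmax
    · have hceq : c = (P.length : Int) + 1 := by omega
      have hr : 1 ≤ r := by
        have h := (PySem.List.le_foldl_max (zs.map Prod.snd) (max (P.length : Int) c)).1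
        omega
      obtain ⟨r', rfl⟩ : ∃ r', r = r' + 1 := ⟨r - 1, by omega⟩
      have hrep : List.replicate (r' + 1) ([] : List Int) = [] :: List.replicate r' [] := rfl
      have hstepA : pvStepA (P ++ List.replicate (r' + 1) []) (x, c)
          = (P ++ [[x]]) ++ List.replicate r' [] := by
        simp only [pvStepA, hrep]
        have hget : PySem.List.pyGetD (P ++ [] :: List.replicate r' []) (c - 1) ([] : List Int)
            = [] := by
          rw [PySem.List.pyGetD_eq_getElem _ _ (by omega) (by simp; omega)]
          rw [List.getElem_append_right (by omega)]
          have h0 : c.toNat - 1 - P.length = 0 := by omega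
          simp [h0]
        rw [hget, PySem.List.pySetD_of_nonneg _ _ (by omega), List.set_append,
          if_neg (by omega)]
        have hidx : (c - 1).toNat - P.length = 0 := by omega
        rw [hidx]
        simp
      have hstepB : pvStep P (x, c) = P ++ [[x]] := by
        simp only [pvStep]
        rw [if_pos (by omega)]
      rw [hstepA, hstepB]
      apply ih
      · have hlen2 : (((P ++ [[x]]).length : Nat) : Int) = max (P.length : Int) c := by
          simp; omega
        rwa [hlen2]
      · have hlen2 : (((P ++ [[x]]).length : Nat) : Int) = max (P.length : Int) c := by
          simp; omega
        rw [hlen2]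
        push_cast at hmax
        omega

lemma pvPartA_eq (list cw : List Int) (hlen : list.length = cw.length)
    (hval : pvValid 0 cw) (hne : cw ≠ []) :
    pvPartA list cw = (list.zip cw).foldl pvStep [] := by
  obtain ⟨c0, t, rfl⟩ := List.exists_cons_of_ne_nil hne
  have hc1 : 1 ≤ c0 := hval.1
  have hnum : (PySem.List.max? (c0 :: t) (fun v => v)).getD 0 = (c0 :: t).foldl max 0 := by
    rw [PySem.List.max?_id_cons]
    simp only [Option.getD_some, List.foldl_cons]
    have : max (0 : Int) c0 = c0 := by omega
    rw [this]
  have hnum0 : 0 ≤ (c0 :: t).foldl max 0 := (PySem.List.le_foldl_max (c0 :: t) 0).1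
  rw [pvPartA, hnum, pvInitRep, List.length_range, List.nil_append]
  rw [pvFold2 (c0 :: t) list
    (fun acc el sub => PySem.List.pySetD acc (sub - 1)
      (PySem.List.pyGetD acc (sub - 1) [] ++ [el])) _ hlen]
  have hsnd : (list.zip (c0 :: t)).map Prod.snd = c0 :: t :=
    List.map_snd_zip (by omega)
  have hA : (list.zip (c0 :: t)).foldl
      (fun acc p => PySem.List.pySetD acc (p.2 - 1)
        (PySem.List.pyGetD acc (p.2 - 1) [] ++ [p.1])) (List.replicate ((c0 :: t).foldl max 0).toNat []) =
      (list.zip (c0 :: t)).foldl pvStepA (([] : List (List Int)) ++ List.replicate ((c0 :: t).foldl max 0).toNat []) := by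
    rw [List.nil_append]
    rfl
  rw [hA, pvGrow]
  · rw [hsnd]
    simpa using hval
  · rw [hsnd]
    simp only [List.length_nil, Nat.cast_zero, zero_add]
    omega

-- ===== VERDICT (by name: the statement is the Claim_ definition above) =====
theorem get_partitions_spec : Claim_equal_get_partitions := by
  intro list k _hdom hpre
  unfold Spec_get_partitions
  cases list with
  | nil => exact absurd rfl hpre
  | cons a l =>
    calc get_partitions (a :: l) k
        = (pvGetCodewords (((a :: l).length : Nat) : Int) k).foldl
            (fun partitions codeword => partitions ++ [pvPartA (a :: l) codeword]) [] := rfl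
      _ = (pvGen (pvKK k) (l.length + 1) 0).map (pvPartA (a :: l)) := by
          rw [show (((a :: l).length : Nat) : Int) = (((l.length + 1 : Nat) : Nat) : Int) from by simp]
          rw [pvCodewords_eq k l.length, PySem.List.foldl_append_singleton_eq_map]
          simp
      _ = (pvGen (pvKK k) (l.length + 1) 0).map
            (fun suf => ((a :: l).zip suf).foldl pvStep []) := by
          apply List.map_congr_left
          intro cw hcw
          have hlen : cw.length = l.length + 1 := pvGen_length_mem _ _ _ cw hcw
          apply pvPartA_eq
          · simp [hlen]
          · exact pvGen_valid _ _ _ cw hcw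
          · intro h; rw [h] at hlen; simp at hlen
      _ = pvGenAlt (pvKK k) (a :: l) [] := by
          rw [pvGenAlt_eq (pvKK k) (a :: l) [] (by have := pvKK_ge_one k; simp; omega)]
          simp
      _ = get_partitions_alt (a :: l) k := rfl
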